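-- pv_equiv track=rewrite | github.com/sergekostenchuk/Auto-iFlow-3.1.1-code | apps/backend/spec/pipeline/preflight_scoper.py | _apply_priority_filter
-- ===== SOURCE A (Python) =====
-- def _apply_priority_filter(tests: list[str], max_count: int) -> list[str]:
--     priorities = [
--         "PYTEST_SECURITY",
--         "PYTEST_PIPELINE",
--         "PYTEST_PROOF_GATE",
--         "NPM_TEST",
--         "PYTEST_COLLECT",
--     ]
--     rank = {alias: index for index, alias in enumerate(priorities)}
--     indexed = list(enumerate(tests))
--     indexed.sort(key=lambda item: (rank.get(item[1], len(rank)), item[0]))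
--     return [alias for _, alias in indexed[:max_count]]
-- ===== SOURCE B (Python) =====
-- def _apply_priority_filter(tests: list[str], max_count: int) -> list[str]:
--     priorities = [
--         "PYTEST_SECURITY",
--         "PYTEST_PIPELINE",
--         "PYTEST_PROOF_GATE",
--         "NPM_TEST",
--         "PYTEST_COLLECT",
--     ]
--     ordered = []
--     for p in priorities:
--         ordered += [t for t in tests if t == p]
--     known = set(priorities)
--     ordered += [t for t in tests if t not in known]
--     return ordered[:max_count]
-- ===== Notes on version B (the rewrite author's own statement) =====
-- stated objective: alternative
-- what changed: Replaces the sort of (rank, index)-keyed pairs by bucket passes: one order-preserving filter pass per fixed priority plus one pass for the unranked tests, concatenated and truncated.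
import Mathlib
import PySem

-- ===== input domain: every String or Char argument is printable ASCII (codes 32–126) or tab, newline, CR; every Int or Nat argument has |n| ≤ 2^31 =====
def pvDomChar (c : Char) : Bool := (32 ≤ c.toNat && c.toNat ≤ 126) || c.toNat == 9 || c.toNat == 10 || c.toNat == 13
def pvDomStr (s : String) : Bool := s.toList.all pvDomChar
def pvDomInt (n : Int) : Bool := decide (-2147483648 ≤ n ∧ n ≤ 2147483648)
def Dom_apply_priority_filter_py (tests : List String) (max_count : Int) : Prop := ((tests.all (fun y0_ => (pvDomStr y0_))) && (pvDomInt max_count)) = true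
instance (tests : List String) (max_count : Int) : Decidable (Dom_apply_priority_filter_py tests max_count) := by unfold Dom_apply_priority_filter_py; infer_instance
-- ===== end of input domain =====

-- B replaces A's sort of (rank, index)-keyed pairs by bucket passes: one order-preserving
-- filter pass per fixed priority plus one pass for unranked tests (objective: alternative).

-- ===== PORT A =====
-- the fixed priority list (the same literal in both Pythons)
def pvP : List String :=
  ["PYTEST_SECURITY", "PYTEST_PIPELINE", "PYTEST_PROOF_GATE", "NPM_TEST", "PYTEST_COLLECT"]

-- A: sort enumerated tests by (rank.get(alias, len(rank)), index), slice, project the aliases.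
def apply_priority_filter_py (tests : List String) (max_count : Int) : List String :=
  let priorities : List String := pvP
  let rank : PySem.Dict String Int :=
    (PySem.List.enumerate priorities).foldl (fun d p => d.insert p.2 p.1) PySem.Dict.empty
  let indexed : List (Int × String) := PySem.List.enumerate tests
  let sortedIdx := PySem.List.sorted2 indexed
      (fun item => rank.getD item.2 ((PySem.Dict.size rank : Nat) : Int)) (fun item => item.1)
  (PySem.List.slice sortedIdx none (some max_count)).map (fun p => p.2)

-- ===== PORT B =====
-- B: for each priority in order, append the matching tests; then append the unranked ones; slice.
def apply_priority_filter_py_alt (tests : List String) (max_count : Int) : List String :=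
  let priorities : List String := pvP
  let ordered : List String :=
    priorities.foldl (fun acc p => acc ++ tests.filter (fun t => t == p)) []
  let known : PySem.Set String := PySem.Set.ofList priorities
  let ordered2 := ordered ++ tests.filter (fun t => !(PySem.Set.contains known t))
  PySem.List.slice ordered2 none (some max_count)

-- ===== PRECONDITION & SPEC =====
def Spec_apply_priority_filter_py (tests : List String) (max_count : Int) (out : List String) : Prop := out = apply_priority_filter_py_alt tests max_count
instance (tests : List String) (max_count : Int) (out : List String) : Decidable (Spec_apply_priority_filter_py tests max_count out) := by unfold Spec_apply_priority_filter_py; infer_instance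

-- ===== CLAIM (what is proved, stated in full; the proofs are below) =====
def Claim_equal_apply_priority_filter_py : Prop := ∀ (tests : List String) (max_count : Int), Dom_apply_priority_filter_py tests max_count → Spec_apply_priority_filter_py tests max_count (apply_priority_filter_py tests max_count)

-- ===== LEMMAS AND PROOFS =====

-- A's rank dict, rank = {alias: index for index, alias in enumerate(priorities)} (proof-side name)
def pvRank : PySem.Dict String Int :=
  (PySem.List.enumerate pvP).foldl (fun d p => d.insert p.2 p.1) PySem.Dict.empty

-- A's sort key, first component: the rank of an alias (proof-side abbreviation)
def pvK1 (s : String) : Int := pvRank.getD s ((PySem.Dict.size pvRank : Nat) : Int)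

lemma pvRank_eq : pvRank = PySem.Dict.mk
    [("PYTEST_SECURITY", 0), ("PYTEST_PIPELINE", 1), ("PYTEST_PROOF_GATE", 2),
     ("NPM_TEST", 3), ("PYTEST_COLLECT", 4)] := by decide

lemma pvK1_notmem {s : String} (h : s ∉ pvP) : pvK1 s = 5 := by
  simp only [pvP, List.mem_cons, not_or] at h
  obtain ⟨h1, h2, h3, h4, h5, -⟩ := h
  simp [pvK1, pvRank_eq, PySem.Dict.size, PySem.Dict.getD_eq_get?_getD, PySem.Dict.get?_mk_cons,
    Ne.symm h1, Ne.symm h2, Ne.symm h3, Ne.symm h4, Ne.symm h5]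
  rfl

lemma pvK1_le_four {s : String} (h : s ∈ pvP) : pvK1 s ≤ 4 := by
  simp only [pvP, List.mem_cons, List.not_mem_nil, or_false] at h
  rcases h with h | h | h | h | h <;> subst h <;> decide

-- slicing commutes with map
lemma slice_map {α β : Type} (f : α → β) (xs : List α) (b : Int) :
    PySem.List.slice (xs.map f) none (some b) = (PySem.List.slice xs none (some b)).map f := by
  simp [PySem.List.slice, List.map_take]

-- projecting the second components out of a filtered enumeration
lemma map_snd_filter_snd (p : String → Bool) (xs : List String) (s : Int) :
    ((PySem.List.enumerate xs s).filter (fun it => p it.2)).map (fun x => x.2) = xs.filter p := by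
  induction xs generalizing s with
  | nil => simp [PySem.List.enumerate]
  | cons x t ih =>
    rw [PySem.List.enumerate_cons]
    by_cases h : p x <;> simp [h, ih]

-- sorted2 is sort by the lexicographic pair key
lemma sorted2_eq_sorted_lex {α : Type} (xs : List α) (k1 k2 : α → Int) :
    PySem.List.sorted2 xs k1 k2 = PySem.List.sorted xs (fun x => toLex (k1 x, k2 x)) := by
  rw [PySem.List.sorted_eq_foldl_insertBy]
  unfold PySem.List.sorted2
  show List.foldl (fun acc x => PySem.List.insertBy
      (fun a b => decide (k1 a < k1 b) || (!decide (k1 b < k1 a) && decide (k2 a < k2 b))) x acc) [] xs = _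
  congr 1
  funext acc x
  congr 1
  funext a b
  by_cases h1 : k1 a < k1 b <;> by_cases h2 : k1 b < k1 a <;> by_cases h3 : k2 a < k2 b <;>
    simp [h1, h2, h3, Prod.Lex.lt_iff] <;> omega

-- consing one ranked element onto the bucket decomposition
lemma buckets_cons_perm (ps : List String) (hnd : ps.Nodup) (x : Int × String)
    (L : List (Int × String)) (hx : x.2 ∈ ps) :
    (ps.flatMap (fun p => ((x :: L).filter (fun it => it.2 == p)))).Perm
      (x :: ps.flatMap (fun p => L.filter (fun it => it.2 == p))) := by
  induction ps with
  | nil => simp at hx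
  | cons p ps' ih =>
    simp only [List.flatMap_cons]
    rcases List.nodup_cons.mp hnd with ⟨hp, hnd'⟩
    by_cases he : x.2 = p
    · have hrest : ps'.flatMap (fun q => ((x :: L).filter (fun it => it.2 == q)))
          = ps'.flatMap (fun q => (L.filter (fun it => it.2 == q))) := by
        apply List.flatMap_congr
        intro q hq
        have : (x.2 == q) = false := by
          simp only [beq_eq_false_iff_ne]
          intro h; exact hp (he ▸ h ▸ hq)
        simp [this]
      rw [hrest, List.filter_cons]
      simp only [he, beq_self_eq_true, if_pos]
      exact List.Perm.refl _
    · have : (x.2 == p) = false := beq_eq_false_iff_ne.mpr he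
      rw [List.filter_cons]
      simp only [this, Bool.false_eq_true, reduceIte]
      have hx' : x.2 ∈ ps' := by rcases List.mem_cons.mp hx with h | h; exact absurd h he; exact h
      exact (List.Perm.append_left _ (ih hnd' hx')).trans List.perm_middle

-- the bucket decomposition is a permutation of the enumerated list
lemma buckets_perm (ps : List String) (hnd : ps.Nodup) (L : List (Int × String)) :
    ((ps.flatMap (fun p => L.filter (fun it => it.2 == p))) ++
      L.filter (fun it => !(ps.contains it.2))).Perm L := by
  induction L with
  | nil => simp
  | cons x L ih =>
    by_cases hx : x.2 ∈ ps
    · have h1 := buckets_cons_perm ps hnd x L hx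
      have h2 : (x :: L).filter (fun it => !(ps.contains it.2))
          = L.filter (fun it => !(ps.contains it.2)) := by simp [hx]
      rw [h2]
      exact (h1.append_right _).trans (ih.cons x)
    · have h1 : ps.flatMap (fun p => ((x :: L).filter (fun it => it.2 == p)))
          = ps.flatMap (fun p => (L.filter (fun it => it.2 == p))) := by
        apply List.flatMap_congr
        intro q hq
        have : (x.2 == q) = false := by
          simp only [beq_eq_false_iff_ne]; intro h; exact hx (h ▸ hq)
        simp [this]
      have h2 : (x :: L).filter (fun it => !(ps.contains it.2))
          = x :: L.filter (fun it => !(ps.contains it.2)) := by simp [hx]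
      rw [h1, h2]
      exact List.perm_middle.trans (ih.cons x)

lemma lex_of_fst {a b : Int × Int} (h : a.1 < b.1) : (toLex a : Lex (Int × Int)) < toLex b :=
  Prod.Lex.lt_iff.mpr (Or.inl h)

lemma lex_of_snd {a b : Int × Int} (h1 : a.1 = b.1) (h2 : a.2 < b.2) :
    (toLex a : Lex (Int × Int)) < toLex b :=
  Prod.Lex.lt_iff.mpr (Or.inr ⟨h1, h2⟩)

-- the bucket decomposition is strictly increasing in A's lexicographic sort key
lemma buckets_pairwise (tests : List String) :
    ((pvP.flatMap (fun p => (PySem.List.enumerate tests).filter (fun it => it.2 == p))) ++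
      (PySem.List.enumerate tests).filter (fun it => !(pvP.contains it.2))).Pairwise
      (fun a b => (toLex (pvK1 a.2, a.1) : Lex (Int × Int)) < toLex (pvK1 b.2, b.1)) := by
  rw [List.pairwise_append]
  refine ⟨?_, ?_, ?_⟩
  · rw [List.flatMap_def, List.pairwise_flatten]
    constructor
    · intro l hl
      rcases List.mem_map.mp hl with ⟨p, hp, rfl⟩
      rw [List.pairwise_filter]
      refine (PySem.List.pairwise_lt_enumerate tests 0).imp_of_mem ?_
      intro a b _ _ hlt ha hb
      have ea : a.2 = p := by simpa using ha
      have eb : b.2 = p := by simpa using hb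
      exact lex_of_snd (by rw [ea, eb]) hlt
    · rw [List.pairwise_map]
      have hpw : pvP.Pairwise (fun p q => pvK1 p < pvK1 q) := by decide
      refine hpw.imp_of_mem ?_
      intro p q _ _ hlt x hx y hy
      have ex : x.2 = p := by simpa using (List.mem_filter.mp hx).2
      have ey : y.2 = q := by simpa using (List.mem_filter.mp hy).2
      exact lex_of_fst (by rw [ex, ey]; exact hlt)
  · rw [List.pairwise_filter]
    refine (PySem.List.pairwise_lt_enumerate tests 0).imp_of_mem ?_
    intro a b _ _ hlt ha hb
    have na : a.2 ∉ pvP := by simpa using ha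
    have nb : b.2 ∉ pvP := by simpa using hb
    exact lex_of_snd (by rw [pvK1_notmem na, pvK1_notmem nb]) hlt
  · intro a ha b hb
    rcases List.mem_flatMap.mp ha with ⟨p, hp, haf⟩
    have ea : a.2 = p := by simpa using (List.mem_filter.mp haf).2
    have nb : b.2 ∉ pvP := by simpa using (List.mem_filter.mp hb).2
    have h4 : pvK1 a.2 ≤ 4 := pvK1_le_four (ea ▸ hp)
    have h5 : pvK1 b.2 = 5 := pvK1_notmem nb
    exact lex_of_fst (by show pvK1 a.2 < pvK1 b.2; omega)

-- A's sort of the enumerated tests IS the bucket decomposition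
lemma sorted_buckets (tests : List String) :
    PySem.List.sorted2 (PySem.List.enumerate tests)
      (fun item => pvRank.getD item.2 ((PySem.Dict.size pvRank : Nat) : Int)) (fun item => item.1)
    = (pvP.flatMap (fun p => (PySem.List.enumerate tests).filter (fun it => it.2 == p))) ++
      (PySem.List.enumerate tests).filter (fun it => !(pvP.contains it.2)) := by
  rw [sorted2_eq_sorted_lex]
  exact PySem.List.sorted_eq_of_perm_of_pairwise_lt _ _ _
    (buckets_perm pvP (by decide) _) (buckets_pairwise tests)

-- ===== VERDICT (by name: the statement is the Claim_ definition above) =====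
theorem apply_priority_filter_py_spec : Claim_equal_apply_priority_filter_py := by
  intro tests mc _
  show (PySem.List.slice
        (PySem.List.sorted2 (PySem.List.enumerate tests)
          (fun item => pvRank.getD item.2 ((PySem.Dict.size pvRank : Nat) : Int))
          (fun item => item.1)) none (some mc)).map (fun p => p.2)
      = PySem.List.slice
          ((pvP.foldl (fun acc p => acc ++ tests.filter (fun t => t == p)) []) ++
            tests.filter (fun t => !(PySem.Set.contains (PySem.Set.ofList pvP) t)))
          none (some mc)
  rw [sorted_buckets tests, ← slice_map]
  congr 1
  rw [List.map_append, PySem.List.foldl_append_eq_flatMap, List.nil_append]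
  have hset : PySem.Set.ofList pvP = pvP := by decide
  rw [hset]
  congr 1
  · rw [List.map_flatMap]
    apply List.flatMap_congr
    intro p _
    exact map_snd_filter_snd (fun t => t == p) tests 0
  · exact map_snd_filter_snd (fun t => !(pvP.contains t)) tests 0
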